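-- pv_equiv track=rewrite | github.com/Dan-Doit/Python_practice | 369game(noLoop).py | func
-- ===== SOURCE A (Python) =====
-- def func(count,num):
--     ans = 0
--     if count > len(num)-1:
--         return ans
--     if num[count] == '3':
--         ans = 1
--     elif num[count] == '6':
--         ans = 1
--     elif num[count] == '9':
--         ans = 1
--     count += 1
--     return ans + func(count,num)
-- ===== SOURCE B (Python) =====
-- def func(count, num):
--     total = 0
--     for i in range(count, len(num)):
--         if num[i] in '369':
--             total += 1
--     return total
-- ===== Notes on version B (the rewrite author's own statement) =====
-- stated objective: idiomatic
-- what changed: Replaces the per-index recursion and 3-way elif chain with a single for-loop over range(count, len(num)) accumulating a counter with an `in '369'` membership test.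
import Mathlib
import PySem

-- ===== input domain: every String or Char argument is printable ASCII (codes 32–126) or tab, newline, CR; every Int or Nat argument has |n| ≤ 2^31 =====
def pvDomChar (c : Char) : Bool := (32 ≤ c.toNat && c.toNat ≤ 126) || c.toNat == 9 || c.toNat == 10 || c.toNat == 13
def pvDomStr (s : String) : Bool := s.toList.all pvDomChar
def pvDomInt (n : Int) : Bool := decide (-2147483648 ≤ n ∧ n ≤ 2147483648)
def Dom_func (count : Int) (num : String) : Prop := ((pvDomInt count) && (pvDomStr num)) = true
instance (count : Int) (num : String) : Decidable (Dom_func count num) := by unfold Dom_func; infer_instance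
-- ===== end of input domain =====

-- B replaces A's per-index recursion + elif chain by one loop over range(count, len(num))
-- with an `in '369'` membership test (idiomatic; same cost).

-- ===== PORT A =====
-- literal transliteration of A's recursion; `none` from pyGet? is A's IndexError
-- (unreachable under Pre_func), the port supplies 0 there.
def func (count : Int) (num : String) : Int :=
  if count > PySem.Str.len num - 1 then 0
  else
    let ans : Int :=
      match PySem.Str.pyGet? num count with
      | some c =>
          if c = '3' then 1
          else if c = '6' then 1
          else if c = '9' then 1
          else 0
      | none => 0
    ans + func (count + 1) num
termination_by (PySem.Str.len num - count).toNat
decreasing_by simp only [PySem.Str.len_eq] at *; omega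

-- ===== PORT B =====
def func_alt (count : Int) (num : String) : Int :=
  (PySem.List.pyRange count (PySem.Str.len num) 1).foldl
    (fun total i =>
      match PySem.Str.pyGet? num i with
      | some c => if c ∈ ("369".toList) then total + 1 else total
      | none => total)  -- IndexError in Python B; unreachable under Pre_func
    0

-- ===== PRECONDITION & SPEC =====
-- Pre_ excludes exactly count < -len(num), where both A and B raise IndexError.
def Pre_func (count : Int) (num : String) : Prop := -(PySem.Str.len num) ≤ count
instance (count : Int) (num : String) : Decidable (Pre_func count num) := by
  unfold Pre_func; infer_instance

def pvWitness_func : Int × String := (1, "13639")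

def Spec_func (count : Int) (num : String) (out : Int) : Prop := out = func_alt count num
instance (count : Int) (num : String) (out : Int) : Decidable (Spec_func count num out) := by
  unfold Spec_func; infer_instance

-- ===== CLAIM (what is proved, stated in full; the proofs are below) =====
def Claim_equal_func : Prop := ∀ (count : Int) (num : String),
  Dom_func count num → Pre_func count num → Spec_func count num (func count num)

-- ===== LEMMAS AND PROOFS =====

-- the per-index contribution both programs count
def pvHit (num : String) (i : Int) : Int :=
  match PySem.Str.pyGet? num i with
  | some c => if c ∈ ("369".toList) then 1 else 0
  | none => 0

theorem func_alt_eq_sum (count : Int) (num : String) :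
    func_alt count num
      = ((PySem.List.pyRange count (PySem.Str.len num) 1).map (pvHit num)).sum := by
  unfold func_alt
  have hf : (fun (total : Int) (i : Int) =>
      match PySem.Str.pyGet? num i with
      | some c => if c ∈ ("369".toList) then total + 1 else total
      | none => total)
      = fun total i => total + pvHit num i := by
    funext total i
    unfold pvHit
    cases PySem.Str.pyGet? num i with
    | none => simp
    | some c => simp; split_ifs <;> ring
  rw [hf, PySem.List.foldl_add]
  simp

theorem func_eq_sum (count : Int) (num : String) (hpre : Pre_func count num) :
    func count num
      = ((PySem.List.pyRange count (PySem.Str.len num) 1).map (pvHit num)).sum := by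
  have hlen : PySem.Str.len num = (num.toList.length : Int) := by simp
  unfold Pre_func at hpre
  by_cases h : count > PySem.Str.len num - 1
  · rw [func]
    simp only [h, if_true]
    rw [PySem.List.pyRange_one_eq_nil (by omega)]
    simp
  · rw [func]
    simp only [h, if_false]
    have hcons := PySem.List.pyRange_one_cons (a := count) (b := PySem.Str.len num)
      (by omega)
    rw [hcons]
    simp only [List.map_cons, List.sum_cons]
    have hrec := func_eq_sum (count + 1) num (by unfold Pre_func; omega)
    rw [hrec]
    have hsome : ∃ c, PySem.Str.pyGet? num count = some c := by
      rcases Option.eq_none_or_eq_some (PySem.Str.pyGet? num count) with he | he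
      · exfalso
        rw [PySem.Str.pyGet?_eq, PySem.Chars.pyGet?_eq_listPyGet?,
           PySem.List.pyGet?_eq_none_iff] at he
        exact he (by constructor <;> omega)
      · exact he
    rcases hsome with ⟨c, hc⟩
    unfold pvHit
    rw [hc]
    congr 1
    -- elif chain equals membership in "369"
    have : ("369".toList) = ['3', '6', '9'] := by decide
    rw [this]
    by_cases h3 : c = '3'
    · simp [h3]
    · by_cases h6 : c = '6'
      · simp [h6]
      · by_cases h9 : c = '9'
        · simp [h9]
        · simp [h3, h6, h9]
termination_by (PySem.Str.len num - count).toNat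
decreasing_by simp only [PySem.Str.len_eq] at *; omega

-- ===== VERDICT (by name: the statement is the Claim_ definition above) =====
theorem func_spec : Claim_equal_func := by
  intro count num _hdom hpre
  unfold Spec_func
  rw [func_eq_sum count num hpre, func_alt_eq_sum]
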